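-- pv_equiv track=rewrite | github.com/fpalm1991/web-text-analysis | src/functions.py | analyze_texts_from_urls
-- ===== SOURCE A (Python) =====
-- import string
--
-- def analyze_texts_from_urls(text_dict: dict) -> dict:
--     """Returns dictionary with frequency of the words in text of the web page."""
--     text = ""
--
--     # Collect text in one string
--     for v in text_dict.values():
--         for entry in v:
--             text += entry.strip().lower() + " "
--
--     # Prepare text to list
--     # TODO: remove stop words
--     punctuations = string.punctuation
--     punctuations += "«»1234567890"
--     for character in punctuations:
--         text = text.replace(character, " ")
--
--     word_list = text.split(" ")
--
--     # Analyze text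
--     word_counts = dict()
--     for word in word_list:
--         word = word.strip()
--         if word and len(word) > 1:
--             word_counts[word] = word_counts.get(word, 0) + 1
--
--     return word_counts
-- ===== SOURCE B (Python) =====
-- import string
--
-- _SEPARATORS = set(string.punctuation + "«»1234567890 ")
--
--
-- def _flush(counts, cur):
--     w = cur.strip()
--     if w and len(w) > 1:
--         counts[w] = counts.get(w, 0) + 1
--
--
-- def analyze_texts_from_urls(text_dict: dict) -> dict:
--     """Single fused pass: scan each entry character by character, cutting words
--     at separator characters, never building the concatenated corpus string."""
--     counts = {}
--     for v in text_dict.values():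
--         for entry in v:
--             cur = ""
--             for ch in entry.strip().lower():
--                 if ch in _SEPARATORS:
--                     _flush(counts, cur)
--                     cur = ""
--                 else:
--                     cur += ch
--             _flush(counts, cur)
--     return counts
-- ===== Notes on version B (the rewrite author's own statement) =====
-- stated objective: alternative
-- what changed: B replaces A's build-one-big-string / one-replace-pass-per-punctuation-character / split pipeline by a single fused character scan per entry that cuts words at separator characters and updates the count dict on the fly, never materialising the corpus string or the word list.
import Mathlib
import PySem

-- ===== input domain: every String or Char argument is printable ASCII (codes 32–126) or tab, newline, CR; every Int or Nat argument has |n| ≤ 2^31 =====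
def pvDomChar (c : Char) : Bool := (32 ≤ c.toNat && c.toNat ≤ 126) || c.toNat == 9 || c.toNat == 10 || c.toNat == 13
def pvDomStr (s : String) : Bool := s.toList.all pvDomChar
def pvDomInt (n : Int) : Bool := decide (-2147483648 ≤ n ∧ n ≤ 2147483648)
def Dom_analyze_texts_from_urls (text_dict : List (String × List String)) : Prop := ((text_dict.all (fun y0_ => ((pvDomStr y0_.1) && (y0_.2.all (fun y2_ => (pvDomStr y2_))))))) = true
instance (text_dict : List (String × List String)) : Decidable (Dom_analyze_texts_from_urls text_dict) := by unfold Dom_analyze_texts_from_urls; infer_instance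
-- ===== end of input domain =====

-- B replaces A's concatenate-everything / one-replace-pass-per-punctuation-mark / split pipeline
-- by a single fused character scan per entry (objective: alternative; not measured faster).

-- ===== PORT A =====
-- string.punctuation + "«»1234567890", exactly as A builds it
def pvPunctA : List Char := "!\"#$%&'()*+,-./:;<=>?@[\\]^_`{|}~«»1234567890".toList

def analyze_texts_from_urls (text_dict : List (String × List String)) : List (String × Int) :=
  -- text += entry.strip().lower() + " "
  let text : List Char :=
    text_dict.foldl (fun t kv =>
      kv.2.foldl (fun t entry =>
        t ++ PySem.Chars.lower (PySem.Chars.strip entry.toList) ++ [' ']) t) []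
  -- for character in punctuations: text = text.replace(character, " ")
  let text := pvPunctA.foldl (fun t c => PySem.Chars.replace t [c] [' ']) text
  -- word_list = text.split(" ")
  let word_list := PySem.Chars.splitOn text [' ']
  -- counting loop
  let word_counts : PySem.Dict String Int :=
    word_list.foldl (fun d w =>
      let w := PySem.Chars.strip w
      if w ≠ [] ∧ w.length > 1 then
        d.insert (String.ofList w) (d.getD (String.ofList w) 0 + 1)
      else d) PySem.Dict.empty
  word_counts.items

-- ===== PORT B =====
-- set(string.punctuation + "«»1234567890 ")  (separators: punctuation, «», digits and the space)
def pvSeps : List Char := "!\"#$%&'()*+,-./:;<=>?@[\\]^_`{|}~«»1234567890 ".toList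

-- _flush(counts, cur)
def pvFlush (d : PySem.Dict String Int) (cur : List Char) : PySem.Dict String Int :=
  let w := PySem.Chars.strip cur
  if w ≠ [] ∧ w.length > 1 then
    d.insert (String.ofList w) (d.getD (String.ofList w) 0 + 1)
  else d

-- the per-entry character scan of B's inner loop
def pvScanEntry (d : PySem.Dict String Int) (entry : List Char) : PySem.Dict String Int :=
  let r := entry.foldl
    (fun (st : PySem.Dict String Int × List Char) ch =>
      if ch ∈ pvSeps then (pvFlush st.1 st.2, []) else (st.1, st.2 ++ [ch]))
    (d, [])
  pvFlush r.1 r.2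

def analyze_texts_from_urls_alt (text_dict : List (String × List String)) : List (String × Int) :=
  (text_dict.foldl (fun d kv =>
      kv.2.foldl (fun d entry =>
        pvScanEntry d (PySem.Chars.lower (PySem.Chars.strip entry.toList))) d)
    PySem.Dict.empty).items

-- ===== PRECONDITION & SPEC =====
def Spec_analyze_texts_from_urls (text_dict : List (String × List String)) (out : List (String × Int)) : Prop := out = analyze_texts_from_urls_alt text_dict
instance (text_dict : List (String × List String)) (out : List (String × Int)) : Decidable (Spec_analyze_texts_from_urls text_dict out) := by unfold Spec_analyze_texts_from_urls; infer_instance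

-- ===== CLAIM (what is proved, stated in full; the proofs are below) =====
def Claim_equal_analyze_texts_from_urls : Prop := ∀ (text_dict : List (String × List String)), Dom_analyze_texts_from_urls text_dict → Spec_analyze_texts_from_urls text_dict (analyze_texts_from_urls text_dict)

-- ===== LEMMAS AND PROOFS =====

-- the combined effect of A's 43 replace passes on one character
def pvF (c : Char) : Char := if c ∈ pvPunctA then ' ' else c

-- prepend to the head word of a split result
def pvConsHead (p : List Char) : List (List Char) → List (List Char)
  | [] => [p]
  | h :: t => (p ++ h) :: t

-- split on the single character ' '
def pvSp1 : List Char → List (List Char)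
  | [] => [[]]
  | c :: rest => if c = ' ' then [] :: pvSp1 rest else pvConsHead [c] (pvSp1 rest)

theorem pvConsHead_ne_nil (p : List Char) (ts : List (List Char)) : pvConsHead p ts ≠ [] := by
  cases ts <;> simp [pvConsHead]

theorem pvSp1_ne_nil (l : List Char) : pvSp1 l ≠ [] := by
  cases l with
  | nil => simp [pvSp1]
  | cons c rest =>
    simp only [pvSp1]
    split
    · simp
    · exact pvConsHead_ne_nil _ _

theorem pvConsHead_nil (ts : List (List Char)) (h : ts ≠ []) : pvConsHead [] ts = ts := by
  cases ts with
  | nil => exact absurd rfl h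
  | cons a t => simp [pvConsHead]

theorem pvConsHead_consHead (p q : List Char) (ts : List (List Char)) :
    pvConsHead p (pvConsHead q ts) = pvConsHead (p ++ q) ts := by
  cases ts <;> simp [pvConsHead]

theorem pvConsHead_append (p : List Char) (ts us : List (List Char)) (h : ts ≠ []) :
    pvConsHead p (ts ++ us) = pvConsHead p ts ++ us := by
  cases ts with
  | nil => exact absurd rfl h
  | cons a t => simp [pvConsHead]

theorem pvSp1_append_sep (a b : List Char) :
    pvSp1 (a ++ ' ' :: b) = pvSp1 a ++ pvSp1 b := by
  induction a with
  | nil => simp [pvSp1]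
  | cons c a ih =>
    by_cases hc : c = ' '
    · simp [pvSp1, hc, ih]
    · simp only [List.cons_append, pvSp1, hc, ih, if_false]
      rw [pvConsHead_append _ _ _ (pvSp1_ne_nil a)]

theorem pvReplace_go_single (c : Char) (fuel : Nat) :
    ∀ (l acc : List Char), l.length ≤ fuel →
      PySem.Chars.replace.go [c] [' '] fuel l acc
        = acc.reverse ++ l.map (fun x => if x = c then ' ' else x) := by
  induction fuel with
  | zero =>
    intro l acc h
    have : l = [] := List.eq_nil_of_length_eq_zero (Nat.le_zero.mp h)
    subst this; simp [PySem.Chars.replace.go]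
  | succ n ih =>
    intro l acc h
    cases l with
    | nil => simp [PySem.Chars.replace.go]
    | cons x t =>
      simp only [PySem.Chars.replace.go]
      by_cases hx : x = c
      · subst hx
        simp only [List.isPrefixOf, BEq.rfl, Bool.and_self, if_true, List.length_cons,
          List.length_nil, List.drop_succ_cons, List.drop_zero, List.reverse_cons,
          List.reverse_nil, List.nil_append]
        rw [show ([' '] : List Char) ++ acc = ' ' :: acc from rfl,
          ih t (' ' :: acc) (by simpa using Nat.succ_le_succ_iff.mp h)]
        simp
      · have : ([c].isPrefixOf (x :: t)) = false := by
          simp [List.isPrefixOf]; exact fun h' => absurd h'.symm hx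
        rw [this]
        simp only [Bool.false_eq_true, if_false]
        rw [ih t (x :: acc) (by simpa using Nat.lt_succ_iff.mp (by simpa using h))]
        simp [hx]

theorem pvReplace_single (c : Char) (l : List Char) :
    PySem.Chars.replace l [c] [' '] = l.map (fun x => if x = c then ' ' else x) := by
  simp only [PySem.Chars.replace, List.isEmpty_cons, Bool.false_eq_true, if_false]
  simpa using pvReplace_go_single c l.length l [] le_rfl

theorem pvFoldl_replace (ps : List Char) :
    ∀ t : List Char, ' ' ∉ ps →
      ps.foldl (fun t c => PySem.Chars.replace t [c] [' ']) t
        = t.map (fun x => if x ∈ ps then ' ' else x) := by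
  induction ps with
  | nil => intro t _; simp
  | cons p ps ih =>
    intro t hsp
    have hsp' : ' ' ∉ ps := fun h => hsp (List.mem_cons_of_mem _ h)
    have hpne : (' ' : Char) ≠ p := fun h => hsp (h ▸ List.mem_cons_self)
    rw [List.foldl_cons, ih _ hsp', pvReplace_single, List.map_map]
    refine List.map_congr_left ?_
    intro x _
    by_cases hxp : x = p
    · subst hxp
      simp [List.mem_cons, hsp']
    · by_cases hxs : x ∈ ps <;> simp [Function.comp, hxp, hxs, List.mem_cons]

theorem pvSplitOn_go (fuel : Nat) :
    ∀ (l cur : List Char) (acc : List (List Char)), l.length < fuel →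
      PySem.Chars.splitOn.go [' '] fuel l cur acc
        = acc.reverse ++ pvConsHead cur.reverse (pvSp1 l) := by
  induction fuel with
  | zero => intro l cur acc h; exact absurd h (Nat.not_lt_zero _)
  | succ n ih =>
    intro l cur acc h
    cases l with
    | nil => simp [PySem.Chars.splitOn.go, pvSp1, pvConsHead]
    | cons x t =>
      simp only [PySem.Chars.splitOn.go]
      by_cases hx : x = ' '
      · subst hx
        simp only [List.isPrefixOf, BEq.rfl, Bool.and_self, if_true,
          List.length_cons, List.length_nil, List.drop_succ_cons, List.drop_zero]
        rw [ih t [] (cur.reverse :: acc) (by simpa using Nat.lt_succ_iff.mp (by simpa using h))]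
        simp only [List.reverse_nil, pvConsHead_nil _ (pvSp1_ne_nil t)]
        simp [pvSp1, pvConsHead]
      · have : (([' '] : List Char).isPrefixOf (x :: t)) = false := by
          simp [List.isPrefixOf]; exact fun h' => absurd h'.symm hx
        rw [this]
        simp only [Bool.false_eq_true, if_false]
        rw [ih t (x :: cur) acc (by simpa using Nat.lt_succ_iff.mp (by simpa using h))]
        simp [pvSp1, hx, pvConsHead_consHead]

theorem pvSplitOn_single (l : List Char) :
    PySem.Chars.splitOn l [' '] = pvSp1 l := by
  rw [PySem.Chars.splitOn, pvSplitOn_go (l.length + 1) l [] [] (Nat.lt_succ_self _)]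
  simp [pvConsHead_nil _ (pvSp1_ne_nil l)]

theorem pvSp1_flat {α : Type} (f : α → List Char) (ps : List α) :
    pvSp1 (ps.flatMap (fun p => f p ++ [' '])) = ps.flatMap (fun p => pvSp1 (f p)) ++ [[]] := by
  induction ps with
  | nil => simp [pvSp1]
  | cons p ps ih =>
    simp only [List.flatMap_cons]
    rw [List.append_assoc, show ([' '] : List Char) ++ ps.flatMap (fun p => f p ++ [' '])
        = ' ' :: ps.flatMap (fun p => f p ++ [' ']) from rfl,
      pvSp1_append_sep, ih, List.append_assoc]

theorem pvFlush_nil (d : PySem.Dict String Int) : pvFlush d [] = d := by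
  simp [pvFlush, show PySem.Chars.strip ([] : List Char) = [] from rfl]

theorem pvSeps_eq : pvSeps = pvPunctA ++ [' '] := by decide

-- foldl over a flatMap is the nested fold
theorem pvFoldl_flatMap {α β γ : Type} (l : List α) (g : α → List β)
    (f : γ → β → γ) (init : γ) :
    (l.flatMap g).foldl f init = l.foldl (fun acc x => (g x).foldl f acc) init := by
  induction l generalizing init with
  | nil => rfl
  | cons x l ih => simp [List.flatMap_cons, List.foldl_append, ih]

-- core: B's character scan of a piece = A's count loop over the words of the mapped piece
theorem pvScan_aux (p : List Char) :
    ∀ (cur : List Char) (d : PySem.Dict String Int),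
      (let r := p.foldl
          (fun (st : PySem.Dict String Int × List Char) ch =>
            if ch ∈ pvSeps then (pvFlush st.1 st.2, []) else (st.1, st.2 ++ [ch]))
          (d, cur)
       pvFlush r.1 r.2)
      = (pvConsHead cur (pvSp1 (p.map pvF))).foldl pvFlush d := by
  induction p with
  | nil => intro cur d; simp [pvSp1, pvConsHead]
  | cons c p ih =>
    intro cur d
    by_cases hc : c ∈ pvSeps
    · have hF : pvF c = ' ' := by
        rw [pvSeps_eq] at hc
        rcases List.mem_append.mp hc with h | h
        · simp [pvF, h]
        · simp at h; simp [pvF, h]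
      simp only [List.foldl_cons, if_pos hc, List.map_cons, hF, pvSp1]
      rw [ih [] (pvFlush d cur), pvConsHead_nil _ (pvSp1_ne_nil _)]
      cases h : pvSp1 (p.map pvF) with
      | nil => exact absurd h (pvSp1_ne_nil _)
      | cons a t => simp [pvConsHead]
    · have hcp : c ∉ pvPunctA := fun h => hc (pvSeps_eq ▸ List.mem_append.mpr (Or.inl h))
      have hcs : c ≠ ' ' := fun h => hc (pvSeps_eq ▸ List.mem_append.mpr (Or.inr (by simp [h])))
      have hF : pvF c = c := by simp [pvF, hcp]
      simp only [List.foldl_cons, if_neg hc, List.map_cons, hF, pvSp1, if_neg hcs]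
      rw [ih (cur ++ [c]) d, pvConsHead_consHead]

theorem pvScanEntry_eq (d : PySem.Dict String Int) (p : List Char) :
    pvScanEntry d p = (pvSp1 (p.map pvF)).foldl pvFlush d := by
  rw [pvScanEntry, pvScan_aux p [] d, pvConsHead_nil _ (pvSp1_ne_nil _)]

-- ===== VERDICT (by name: the statement is the Claim_ definition above) =====
theorem analyze_texts_from_urls_spec : Claim_equal_analyze_texts_from_urls := by
  intro td _
  simp only [Spec_analyze_texts_from_urls, analyze_texts_from_urls, analyze_texts_from_urls_alt]
  refine congrArg PySem.Dict.items ?_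
  -- name the per-entry preprocessing and the flattened entry list
  set g0 : String → List Char := fun e => PySem.Chars.lower (PySem.Chars.strip e.toList) with hg0
  -- A's concatenated text is the flatMap of the pieces, each followed by one space
  have htext : (td.foldl (fun t kv =>
        kv.2.foldl (fun t entry => t ++ g0 entry ++ [' ']) t) ([] : List Char))
      = (td.flatMap (·.2)).flatMap (fun e => g0 e ++ [' ']) := by
    simp only [List.append_assoc]
    rw [PySem.List.foldl_congr_mem td _
        (fun (t : List Char) kv => t ++ kv.2.flatMap (fun e => g0 e ++ [' '])) []
        (fun acc kv _ => PySem.List.foldl_append_eq_flatMap _ _ _),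
      PySem.List.foldl_append_eq_flatMap, List.nil_append, List.flatMap_assoc]
  rw [htext]
  -- A's 43 replace passes act as one character map pvF
  rw [pvFoldl_replace _ _ (by decide)]
  have hmap : ((td.flatMap (·.2)).flatMap (fun e => g0 e ++ [' '])).map
        (fun x => if x ∈ pvPunctA then ' ' else x)
      = (td.flatMap (·.2)).flatMap (fun e => (g0 e).map pvF ++ [' ']) := by
    rw [List.map_flatMap]
    refine List.flatMap_congr ?_
    intro e _
    simp [pvF, List.map_append]
  rw [hmap, pvSplitOn_single, pvSp1_flat, List.foldl_append]
  -- A's counting body IS pvFlush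
  rw [show (fun (d : PySem.Dict String Int) (w : List Char) =>
        if PySem.Chars.strip w ≠ [] ∧ (PySem.Chars.strip w).length > 1 then
          d.insert (String.ofList (PySem.Chars.strip w))
            (d.getD (String.ofList (PySem.Chars.strip w)) 0 + 1)
        else d) = pvFlush from rfl]
  -- the trailing empty token is dropped by the guard
  simp only [List.foldl_cons, List.foldl_nil, pvFlush_nil]
  rw [pvFoldl_flatMap]
  rw [PySem.List.foldl_congr_mem _ _ (fun d e => pvScanEntry d (g0 e)) _
      (fun acc e _ => (pvScanEntry_eq acc (g0 e)).symm),
    pvFoldl_flatMap (l := td) (g := (·.2)) (f := fun d e => pvScanEntry d (g0 e))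
      (init := PySem.Dict.empty)]
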